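-- pv_equiv track=rewrite | github.com/jomariencepto/awegen | backend/app/exam/hybrid_nlp.py | _generate_semantic_variations
-- ===== SOURCE A (Python) =====
-- def _generate_semantic_variations(keyword, context_type):
--     """
--     IMPROVED: Generate semantic variations of the keyword.
--     """
--     variations = []
--
--     # Prefix/suffix variations
--     prefixes = ['pre', 'post', 'sub', 'super', 'meta', 'hyper']
--     suffixes = ['er', 'or', 'ing', 'ed', 'ion', 'tion']
--
--     # Add prefix variations
--     for prefix in prefixes:
--         variations.append(f"{prefix}{keyword}")
--
--     # Add suffix variations (simple)
--     for suffix in suffixes: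
--         if not keyword.endswith(suffix):
--             variations.append(f"{keyword}{suffix}")
--
--     # Context-based variations
--     if context_type == 'command':
--         variations.extend([f"{keyword}_{v}" for v in ['cmd', 'util', 'tool']])
--     elif context_type == 'function':
--         variations.extend([f"{keyword}_{v}" for v in ['func', 'method', 'call']])
--     elif context_type == 'data':
--         variations.extend([f"{keyword}_{v}" for v in ['data', 'info', 'value']])
--
--     return variations[:5]  # Return top 5
-- ===== SOURCE B (Python) =====
-- def _generate_semantic_variations(keyword, context_type):
--     # The prefix list in the original has 6 entries and the result is truncated
--     # to 5, so the answer is always the first five prefix variations.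
--     return [f"{p}{keyword}" for p in ['pre', 'post', 'sub', 'super', 'meta']]
-- ===== Notes on version B (the rewrite author's own statement) =====
-- stated objective: simpler
-- what changed: B replaces the suffix loop, the context_type branches and the final [:5] slice by a direct comprehension over the five prefixes that the slice always selects, since the 6-entry prefix list alone already fills the returned window.
import Mathlib
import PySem

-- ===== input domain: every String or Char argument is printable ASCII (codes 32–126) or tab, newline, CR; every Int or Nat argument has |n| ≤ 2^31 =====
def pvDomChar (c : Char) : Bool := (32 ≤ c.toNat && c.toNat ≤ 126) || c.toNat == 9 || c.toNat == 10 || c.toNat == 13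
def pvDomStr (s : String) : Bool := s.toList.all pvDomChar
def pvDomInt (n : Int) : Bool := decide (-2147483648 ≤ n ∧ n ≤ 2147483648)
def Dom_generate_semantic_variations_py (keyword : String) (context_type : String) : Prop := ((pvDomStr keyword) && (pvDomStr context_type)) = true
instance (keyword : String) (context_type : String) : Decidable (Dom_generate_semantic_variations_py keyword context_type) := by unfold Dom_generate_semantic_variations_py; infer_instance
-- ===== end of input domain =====

-- B drops the suffix loop, the context_type branches and the [:5] slice: the 6-entry
-- prefix list already fills the returned window, so B maps the five kept prefixes directly.

-- ===== PORT A =====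
def generate_semantic_variations_py (keyword : String) (context_type : String) : List String :=
  let variations : List String := []
  let prefixes := ["pre", "post", "sub", "super", "meta", "hyper"]
  let suffixes := ["er", "or", "ing", "ed", "ion", "tion"]
  let variations := prefixes.foldl (fun acc prefix_ => acc ++ [prefix_ ++ keyword]) variations
  let variations := suffixes.foldl
    (fun acc suffix_ => if !(PySem.Str.endswith keyword suffix_) then acc ++ [keyword ++ suffix_] else acc)
    variations
  let variations :=
    if context_type == "command" then
      variations ++ (["cmd", "util", "tool"].map (fun v => keyword ++ "_" ++ v))
    else if context_type == "function" then
      variations ++ (["func", "method", "call"].map (fun v => keyword ++ "_" ++ v))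
    else if context_type == "data" then
      variations ++ (["data", "info", "value"].map (fun v => keyword ++ "_" ++ v))
    else variations
  PySem.List.slice variations none (some 5)

-- ===== PORT B =====
def generate_semantic_variations_py_alt (keyword : String) (context_type : String) : List String :=
  ["pre", "post", "sub", "super", "meta"].map (fun p => p ++ keyword)

-- ===== PRECONDITION & SPEC =====
def Spec_generate_semantic_variations_py (keyword : String) (context_type : String) (out : List String) : Prop := out = generate_semantic_variations_py_alt keyword context_type
instance (keyword : String) (context_type : String) (out : List String) : Decidable (Spec_generate_semantic_variations_py keyword context_type out) := by unfold Spec_generate_semantic_variations_py; infer_instance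

-- ===== CLAIM (what is proved, stated in full; the proofs are below) =====
def Claim_equal_generate_semantic_variations_py : Prop := ∀ (keyword : String) (context_type : String), Dom_generate_semantic_variations_py keyword context_type → Spec_generate_semantic_variations_py keyword context_type (generate_semantic_variations_py keyword context_type)

-- ===== LEMMAS AND PROOFS =====

-- take 5 only looks at the first five elements of a list with ≥ 6 explicit heads
-- xs[:5] on the A-side is take 5
theorem pv_slice5 (xs : List String) : PySem.List.slice xs none (some (5 : Int)) = xs.take 5 := by
  have := PySem.List.slice_to (xs := xs) (b := (5 : Int)) (by norm_num)
  simpa using this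

theorem pv_take5 (a b c d e f : String) (t : List String) :
    List.take 5 (a :: b :: c :: d :: e :: f :: t) = [a, b, c, d, e] := rfl

-- ===== VERDICT (by name: the statement is the Claim_ definition above) =====
theorem generate_semantic_variations_py_spec : Claim_equal_generate_semantic_variations_py := by
  intro keyword context_type _
  unfold Spec_generate_semantic_variations_py generate_semantic_variations_py
    generate_semantic_variations_py_alt
  dsimp only
  rw [PySem.List.foldl_append_singleton_eq_map, PySem.List.foldl_append_if]
  split_ifs <;>
    (rw [pv_slice5]; exact pv_take5 _ _ _ _ _ _ _)
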